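-- pv_equiv track=rewrite | github.com/XUNZI1314/ML | pdb_parser.py | _extract_first_model_lines
-- ===== SOURCE A (Python) =====
-- def _record_name(line: str) -> str:
--     """Return uppercase PDB record name from one line."""
--     return line[:6].strip().upper()
--
-- def _extract_first_model_lines(lines: list[str]) -> list[str]:
--     """Extract lines corresponding to the first MODEL block.
--
--     If no MODEL records exist, the original lines are returned.
--     """
--     selected: list[str] = []
--     saw_model = False
--     in_first_model = False
--
--     for line in lines:
--         rec = _record_name(line)
--
--         if rec == "MODEL":
--             if not saw_model:
--                 saw_model = True
--                 in_first_model = True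
--             else:
--                 break
--             continue
--
--         if rec == "ENDMDL":
--             if in_first_model:
--                 break
--             continue
--
--         if saw_model and not in_first_model:
--             continue
--
--         selected.append(line.rstrip("\r\n"))
--
--     return selected
-- ===== SOURCE B (Python) =====
-- def _record_name(line: str) -> str:
--     """Return uppercase PDB record name from one line."""
--     return line[:6].strip().upper()
--
--
-- def _extract_first_model_lines(lines: list[str]) -> list[str]:
--     """Extract lines of the first MODEL block: find the first MODEL record,
--     keep the (ENDMDL-free) prefix before it, then take lines after it up to
--     the next MODEL/ENDMDL record; without any MODEL record, return all
--     non-ENDMDL lines. Lines are rstripped of '\r\n' as in the original."""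
--     idx = next((i for i, l in enumerate(lines) if _record_name(l) == "MODEL"), None)
--     if idx is None:
--         return [l.rstrip("\r\n") for l in lines if _record_name(l) != "ENDMDL"]
--     out = [l.rstrip("\r\n") for l in lines[:idx] if _record_name(l) != "ENDMDL"]
--     for l in lines[idx + 1:]:
--         if _record_name(l) in ("MODEL", "ENDMDL"):
--             break
--         out.append(l.rstrip("\r\n"))
--     return out
-- ===== Notes on version B (the rewrite author's own statement) =====
-- stated objective: alternative
-- what changed: Replaces A's flag-driven single state machine (saw_model/in_first_model booleans) by an index-find of the first MODEL record followed by two shaped passes: a filter+map comprehension over the prefix and a break-on-boundary loop over the suffix.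
import Mathlib
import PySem

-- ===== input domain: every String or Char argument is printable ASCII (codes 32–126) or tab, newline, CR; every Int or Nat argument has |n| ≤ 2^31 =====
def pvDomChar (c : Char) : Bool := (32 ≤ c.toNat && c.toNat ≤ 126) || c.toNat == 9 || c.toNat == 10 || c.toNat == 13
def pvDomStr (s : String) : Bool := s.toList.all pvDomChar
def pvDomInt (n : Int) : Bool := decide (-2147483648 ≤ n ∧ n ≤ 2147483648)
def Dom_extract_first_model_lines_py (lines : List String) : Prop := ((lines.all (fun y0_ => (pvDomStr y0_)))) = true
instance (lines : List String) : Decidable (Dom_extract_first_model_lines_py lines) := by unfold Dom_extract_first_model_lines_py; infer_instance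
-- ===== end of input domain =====

-- B replaces A's flag-driven state machine by an index-find of the first MODEL record plus two
-- shaped passes (filter+map over the prefix, break-on-boundary loop over the suffix); same cost.

-- ===== PORT A =====
-- _record_name: line[:6].strip().upper()  (shared module helper used by both Pythons)
def pvRecName (line : String) : String :=
  PySem.Str.upper (PySem.Str.strip (PySem.Str.slice line none (some 6)))

-- line.rstrip("\r\n"): drop trailing '\r'/'\n' characters; exact for Python's rstrip with that
-- char set (ported by hand: PySem has no chars-argument rstrip).
def pvRstripCRLF (line : String) : String :=
  String.ofList ((line.toList.reverse.dropWhile (fun c => c == '\r' || c == '\n')).reverse)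

-- A's for-loop with `break`/`continue` and the saw_model/in_first_model flags, as structural
-- recursion over the remaining lines carrying the same two flags; `break` returns [] (the
-- already-selected lines are the cons-prefix built so far).
def pvLoopA (rest : List String) (sawModel inFirstModel : Bool) : List String :=
  match rest with
  | [] => []
  | line :: rest' =>
    let recn := pvRecName line
    if recn == "MODEL" then
      if !sawModel then pvLoopA rest' true true else []
    else if recn == "ENDMDL" then
      if inFirstModel then [] else pvLoopA rest' sawModel inFirstModel
    else if sawModel && !inFirstModel then pvLoopA rest' sawModel inFirstModel
    else pvRstripCRLF line :: pvLoopA rest' sawModel inFirstModel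

def extract_first_model_lines_py (lines : List String) : List String :=
  pvLoopA lines false false

-- ===== PORT B =====
-- index of the first line whose record name is MODEL (Source B's `next(... enumerate ...)`)
def pvFindModelIdx (lines : List String) : Option Nat :=
  match lines with
  | [] => none
  | line :: rest =>
    if pvRecName line == "MODEL" then some 0 else (pvFindModelIdx rest).map (· + 1)

-- Source B's tail loop over lines[idx+1:]: append until a MODEL/ENDMDL record, then break
def pvTailB (rest : List String) : List String :=
  match rest with
  | [] => []
  | line :: rest' =>
    if pvRecName line == "MODEL" || pvRecName line == "ENDMDL" then []
    else pvRstripCRLF line :: pvTailB rest'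

def extract_first_model_lines_py_alt (lines : List String) : List String :=
  match pvFindModelIdx lines with
  | none => (lines.filter (fun l => !(pvRecName l == "ENDMDL"))).map pvRstripCRLF
  | some idx =>
      ((lines.take idx).filter (fun l => !(pvRecName l == "ENDMDL"))).map pvRstripCRLF
        ++ pvTailB (lines.drop (idx + 1))

-- ===== PRECONDITION & SPEC =====
def Spec_extract_first_model_lines_py (lines : List String) (out : List String) : Prop := out = extract_first_model_lines_py_alt lines
instance (lines : List String) (out : List String) : Decidable (Spec_extract_first_model_lines_py lines out) := by unfold Spec_extract_first_model_lines_py; infer_instance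

-- ===== CLAIM (what is proved, stated in full; the proofs are below) =====
def Claim_equal_extract_first_model_lines_py : Prop := ∀ (lines : List String), Dom_extract_first_model_lines_py lines → Spec_extract_first_model_lines_py lines (extract_first_model_lines_py lines)

-- ===== LEMMAS AND PROOFS =====

-- after the first MODEL record, A's loop (flags true/true) is exactly B's tail loop
theorem pvLoopA_true_true (rest : List String) : pvLoopA rest true true = pvTailB rest := by
  induction rest with
  | nil => rfl
  | cons line rest' ih =>
    simp only [pvLoopA, pvTailB]
    by_cases hM : pvRecName line == "MODEL"
    · simp [hM]
    · by_cases hE : pvRecName line == "ENDMDL" <;> simp [hM, hE, ih]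

theorem pvLoopA_eq_alt (lines : List String) :
    pvLoopA lines false false = extract_first_model_lines_py_alt lines := by
  induction lines with
  | nil => rfl
  | cons line rest ih =>
    by_cases hM : pvRecName line == "MODEL"
    · have hred : pvLoopA (line :: rest) false false = pvLoopA rest true true := by
        simp [pvLoopA, hM]
      simp only [hred, pvLoopA_true_true, extract_first_model_lines_py_alt, pvFindModelIdx,
        hM, if_true]
      simp
    · have halt : extract_first_model_lines_py_alt (line :: rest) =
          match pvFindModelIdx rest with
          | none => (List.filter (fun l => !(pvRecName l == "ENDMDL")) (line :: rest)).map pvRstripCRLF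
          | some i => ((List.take (i + 1) (line :: rest)).filter
                (fun l => !(pvRecName l == "ENDMDL"))).map pvRstripCRLF
              ++ pvTailB (List.drop (i + 2) (line :: rest)) := by
        simp only [extract_first_model_lines_py_alt, pvFindModelIdx, hM, if_false]
        cases pvFindModelIdx rest <;> simp
      by_cases hE : pvRecName line == "ENDMDL"
      · have hred : pvLoopA (line :: rest) false false = pvLoopA rest false false := by
          simp [pvLoopA, hM, hE]
        rw [hred, ih, halt]
        simp only [extract_first_model_lines_py_alt]
        cases pvFindModelIdx rest <;> simp [hE]
      · have hred : pvLoopA (line :: rest) false false =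
            pvRstripCRLF line :: pvLoopA rest false false := by
          simp [pvLoopA, hM, hE]
        rw [hred, ih, halt]
        simp only [extract_first_model_lines_py_alt]
        cases pvFindModelIdx rest <;> simp [hE]

-- ===== VERDICT (by name: the statement is the Claim_ definition above) =====
theorem extract_first_model_lines_py_spec : Claim_equal_extract_first_model_lines_py := by
  intro lines _
  unfold Spec_extract_first_model_lines_py extract_first_model_lines_py
  exact pvLoopA_eq_alt lines
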